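-- pv_equiv track=rewrite | github.com/andypymont/adventofcode | 2016/day20.py | valid_ips
-- ===== SOURCE A (Python) =====
-- from typing import Iterator, Sequence, Tuple
--
-- Rule = Tuple[int, int]
--
-- def valid_ips(rules: Sequence[Rule], maxint: int) -> Iterator[int]:
--     """
--     Yield all valid IPs from 0 to the provided maximum integer.
--     """
--     ip_address = 0
--     rule = 0
--     while ip_address < maxint:
--         try:
--             lower, upper = rules[rule]
--         except IndexError:
--             lower, upper = ip_address + 1, ip_address + 1
--
--         if ip_address >= lower:
--             if ip_address <= upper:
--                 ip_address = upper + 1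
--                 continue
--             rule += 1
--         else:
--             yield ip_address
--             ip_address += 1
-- ===== SOURCE B (Python) =====
-- from typing import Iterator, Sequence, Tuple
--
-- Rule = Tuple[int, int]
--
-- def valid_ips(rules: Sequence[Rule], maxint: int) -> Iterator[int]:
--     """
--     Yield all valid IPs from 0 to the provided maximum integer.
--     """
--     # Stage 1: build the list of valid (start, end) half-open intervals.
--     intervals = []
--     cursor = 0
--     for lower, upper in rules:
--         gap_end = min(lower, maxint)
--         if cursor < gap_end:
--             intervals.append((cursor, gap_end))
--             cursor = gap_end
--         if lower <= cursor <= upper: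
--             cursor = upper + 1
--     if cursor < maxint:
--         intervals.append((cursor, maxint))
--     # Stage 2: emit the intervals.
--     for start, end in intervals:
--         yield from range(start, end)
-- ===== Notes on version B (the rewrite author's own statement) =====
-- stated objective: faster
-- what changed: A is a flat per-IP state machine (one while loop stepping a cursor one address at a time and re-fetching rules[rule] with a try/except); B is two staged passes: a first pass over the rules builds a list of valid half-open (start, end) intervals with no per-IP work, and a second pass emits each interval with range(), whose C-level iteration replaces A's per-IP Python bytecode loop.
import Mathlib
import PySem

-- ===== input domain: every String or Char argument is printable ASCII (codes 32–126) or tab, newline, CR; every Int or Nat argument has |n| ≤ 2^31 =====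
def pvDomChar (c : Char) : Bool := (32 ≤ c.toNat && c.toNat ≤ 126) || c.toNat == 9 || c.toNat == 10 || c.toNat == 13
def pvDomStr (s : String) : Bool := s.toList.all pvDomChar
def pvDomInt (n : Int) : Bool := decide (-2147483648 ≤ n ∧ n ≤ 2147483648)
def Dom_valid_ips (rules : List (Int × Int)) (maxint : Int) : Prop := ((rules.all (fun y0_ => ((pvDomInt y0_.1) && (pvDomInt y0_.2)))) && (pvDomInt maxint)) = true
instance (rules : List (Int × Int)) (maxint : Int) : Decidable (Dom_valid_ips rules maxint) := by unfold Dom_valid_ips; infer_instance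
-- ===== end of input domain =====

-- B replaces A's per-IP cursor state machine by two staged passes: first build the list of
-- valid half-open intervals from the rules (no per-IP work), then emit each interval with range().

-- ===== PORT A =====
-- A's while loop: state (ip_address, rule); rules[rule] with IndexError fallback
-- (lower, upper) := (ip+1, ip+1), in which case ip >= lower is false so the yield branch runs
-- (that trivially-determined branch is taken directly in the `none` case).
def pvLoopA (rules : List (Int × Int)) (maxint : Int) (ip : Int) (rule : Nat) : List Int :=
  if ip < maxint then
    match h : rules[rule]? with
    | some (lower, upper) =>
      if lower ≤ ip then
        if ip ≤ upper then
          pvLoopA rules maxint (upper + 1) rule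
        else
          pvLoopA rules maxint ip (rule + 1)
      else
        ip :: pvLoopA rules maxint (ip + 1) rule
    | none =>
      ip :: pvLoopA rules maxint (ip + 1) rule
  else []
termination_by ((maxint - ip).toNat, rules.length - rule)
decreasing_by
  · apply Prod.Lex.left; omega
  · have : rule < rules.length := by
      by_contra hc
      simp [List.getElem?_eq_none (by omega : rules.length ≤ rule)] at h
    apply Prod.Lex.right
    omega
  · apply Prod.Lex.left; omega
  · apply Prod.Lex.left; omega

def valid_ips (rules : List (Int × Int)) (maxint : Int) : List Int :=
  pvLoopA rules maxint 0 0

-- ===== PORT B =====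
-- stage 1: the `for lower, upper in rules:` pass building (intervals, cursor)
def pvBuildB (maxint : Int) : List (Int × Int) → Int → List (Int × Int) × Int
  | [], c => ([], c)
  | (lower, upper) :: rs, c =>
    let gapEnd := min lower maxint
    let step := if c < gapEnd then (([(c, gapEnd)] : List (Int × Int)), gapEnd) else ([], c)
    let c2 := if lower ≤ step.2 ∧ step.2 ≤ upper then upper + 1 else step.2
    let rest := pvBuildB maxint rs c2
    (step.1 ++ rest.1, rest.2)

def valid_ips_alt (rules : List (Int × Int)) (maxint : Int) : List Int :=
  let r := pvBuildB maxint rules 0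
  let intervals := r.1 ++ (if r.2 < maxint then [(r.2, maxint)] else [])
  -- stage 2: `for start, end in intervals: yield from range(start, end)`
  intervals.flatMap (fun p => PySem.List.pyRange p.1 p.2 1)

-- ===== PRECONDITION & SPEC =====
def Spec_valid_ips (rules : List (Int × Int)) (maxint : Int) (out : List Int) : Prop := out = valid_ips_alt rules maxint
instance (rules : List (Int × Int)) (maxint : Int) (out : List Int) : Decidable (Spec_valid_ips rules maxint out) := by unfold Spec_valid_ips; infer_instance

-- ===== CLAIM =====
def Claim_equal_valid_ips : Prop := ∀ (rules : List (Int × Int)) (maxint : Int), Dom_valid_ips rules maxint → Spec_valid_ips rules maxint (valid_ips rules maxint)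

-- ===== LEMMAS AND PROOFS =====

-- emit B's (intervals, cursor) state: flatMap of ranges plus the tail interval
def pvEmit (maxint : Int) (r : List (Int × Int) × Int) : List Int :=
  r.1.flatMap (fun p => PySem.List.pyRange p.1 p.2 1) ++
    (if r.2 < maxint then PySem.List.pyRange r.2 maxint 1 else [])

theorem pvBuildB_ge (maxint : Int) (rs : List (Int × Int)) (c : Int) (h : maxint ≤ c) :
    (pvBuildB maxint rs c).1 = [] ∧ maxint ≤ (pvBuildB maxint rs c).2 := by
  induction rs generalizing c with
  | nil => simpa [pvBuildB]
  | cons p rs ih =>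
    obtain ⟨lower, upper⟩ := p
    simp only [pvBuildB]
    rw [if_neg (by omega : ¬ c < min lower maxint)]
    simp only
    by_cases hj : lower ≤ c ∧ c ≤ upper
    · rw [if_pos hj]
      simpa using ih (upper + 1) (by omega)
    · rw [if_neg hj]
      simpa using ih c h

-- key invariant: A's loop from state (ip, rule) equals B's build-then-emit on the remaining rules
theorem pvLoopA_eq (rules : List (Int × Int)) (maxint ip : Int) (rule : Nat) :
    pvLoopA rules maxint ip rule = pvEmit maxint (pvBuildB maxint (rules.drop rule) ip) := by
  induction ip, rule using pvLoopA.induct rules maxint with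
  | case1 ip rule hlt lower upper h hle hup ih =>
    -- jump: lower ≤ ip ≤ upper, A continues at upper+1 with the SAME rule;
    -- B's build step on (lower,upper) produces no interval from either cursor
    have hrl : rule < rules.length := by
      by_contra hc
      simp [List.getElem?_eq_none (by omega : rules.length ≤ rule)] at h
    have hd : rules.drop rule = (lower, upper) :: rules.drop (rule + 1) := by
      have : rules[rule] = (lower, upper) := by
        have := List.getElem?_eq_getElem hrl
        rw [h] at this; exact (Option.some.injEq _ _).mp this.symm
      rw [List.drop_eq_getElem_cons hrl, this]
    rw [pvLoopA, if_pos hlt, h]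
    simp only [if_pos hle, if_pos hup]
    rw [ih, hd]
    simp only [pvBuildB]
    rw [if_neg (by omega : ¬ ip < min lower maxint),
        if_neg (by omega : ¬ (upper + 1) < min lower maxint)]
    simp only
    rw [if_pos (⟨hle, hup⟩ : lower ≤ ip ∧ ip ≤ upper),
        if_neg (by omega : ¬ (lower ≤ upper + 1 ∧ upper + 1 ≤ upper))]
  | case2 ip rule hlt lower upper h hle hup ih =>
    -- skip: ip past the rule entirely, A advances the rule index
    have hrl : rule < rules.length := by
      by_contra hc
      simp [List.getElem?_eq_none (by omega : rules.length ≤ rule)] at h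
    have hd : rules.drop rule = (lower, upper) :: rules.drop (rule + 1) := by
      have : rules[rule] = (lower, upper) := by
        have := List.getElem?_eq_getElem hrl
        rw [h] at this; exact (Option.some.injEq _ _).mp this.symm
      rw [List.drop_eq_getElem_cons hrl, this]
    rw [pvLoopA, if_pos hlt, h]
    simp only [if_pos hle, if_neg hup]
    rw [ih, hd]
    simp only [pvBuildB]
    rw [if_neg (by omega : ¬ ip < min lower maxint)]
    simp only
    rw [if_neg (by omega : ¬ (lower ≤ ip ∧ ip ≤ upper))]
    simp
  | case3 ip rule hlt lower upper h hle ih =>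
    -- gap: ip < lower, A yields ip; B's gap interval from ip is ip :: (interval from ip+1)
    have hrl : rule < rules.length := by
      by_contra hc
      simp [List.getElem?_eq_none (by omega : rules.length ≤ rule)] at h
    have hd : rules.drop rule = (lower, upper) :: rules.drop (rule + 1) := by
      have : rules[rule] = (lower, upper) := by
        have := List.getElem?_eq_getElem hrl
        rw [h] at this; exact (Option.some.injEq _ _).mp this.symm
      rw [List.drop_eq_getElem_cons hrl, this]
    rw [pvLoopA, if_pos hlt, h]
    simp only [if_neg hle]
    rw [ih, hd]
    have hg : ip < min lower maxint := by omega
    simp only [pvBuildB, pvEmit]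
    rw [if_pos hg]
    by_cases h2 : ip + 1 < min lower maxint
    · rw [if_pos h2]
      simp only [List.flatMap_append, List.flatMap_cons, List.flatMap_nil, List.append_nil]
      rw [PySem.List.pyRange_one_cons (by omega : ip < min lower maxint)]
      simp
    · rw [if_neg h2]
      have hgv : min lower maxint = ip + 1 := by omega
      rw [hgv]
      simp only [List.flatMap_append, List.flatMap_cons, List.flatMap_nil, List.nil_append,
        List.append_nil]
      rw [PySem.List.pyRange_one_cons (by omega : ip < ip + 1),
          PySem.List.pyRange_one_eq_nil (by omega : ip + 1 ≤ ip + 1)]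
      simp
  | case4 ip rule hlt h ih =>
    -- rules exhausted (IndexError fallback): the tail interval from ip is ip :: tail from ip+1
    have hrl : rules.length ≤ rule := by
      by_contra hc
      simp [List.getElem?_eq_getElem (by omega : rule < rules.length)] at h
    rw [pvLoopA, if_pos hlt, h]
    rw [ih]
    rw [List.drop_eq_nil_of_le hrl]
    simp only [pvBuildB, pvEmit, List.flatMap_nil, List.nil_append]
    rw [if_pos hlt, PySem.List.pyRange_one_cons hlt]
    by_cases h2 : ip + 1 < maxint
    · rw [if_pos h2]
    · rw [if_neg h2, PySem.List.pyRange_one_eq_nil (by omega : maxint ≤ ip + 1)]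
  | case5 ip rule hlt =>
    rw [pvLoopA, if_neg hlt]
    have := pvBuildB_ge maxint (rules.drop rule) ip (by omega)
    rw [pvEmit, this.1]
    rw [if_neg (by omega : ¬ (pvBuildB maxint (rules.drop rule) ip).2 < maxint)]
    simp

-- ===== VERDICT =====
theorem valid_ips_spec : Claim_equal_valid_ips := by
  intro rules maxint _
  unfold Spec_valid_ips valid_ips valid_ips_alt
  rw [pvLoopA_eq rules maxint 0 0]
  simp only [List.drop_zero, pvEmit, List.flatMap_append]
  by_cases hc : (pvBuildB maxint rules 0).2 < maxint <;> simp [hc]
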